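-- pv_equiv track=rewrite | github.com/atulanandnitt/questionsBank | basicMathematicalProblem/chocolate_station.py | chocolate_station
-- ===== SOURCE A (Python) =====
-- def chocolate_station(list1,wt):
--     list1.insert(0,0)
--     dif=0
--     maxTillNowDiff=-99999
--     for i in range(len(list1) -1):
--         dif += list1[i] - list1[i+1]
--         maxTillNowDiff=max(maxTillNowDiff,dif - list1[i] - list1[i+1])
--     return -1*maxTillNowDiff*wt
-- ===== SOURCE B (Python) =====
-- def chocolate_station(list1, wt):
--     # keep A's in-place mutation
--     list1.insert(0, 0)
--     # the running accumulator telescopes: dif after step i is -list1[i+1],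
--     # so each tracked value is exactly -list1[i] - 2*list1[i+1]
--     m = max([-99999] + [-a - 2 * c for a, c in zip(list1, list1[1:])])
--     return -m * wt
-- ===== Notes on version B (the rewrite author's own statement) =====
-- stated objective: simpler
-- what changed: Removed the running accumulator: since the cumulative difference telescopes to -list1[i+1], B computes each tracked value directly as -a-2*c over adjacent pairs (zip) and takes one max of the mapped list, instead of A's stateful index loop.
import Mathlib
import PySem

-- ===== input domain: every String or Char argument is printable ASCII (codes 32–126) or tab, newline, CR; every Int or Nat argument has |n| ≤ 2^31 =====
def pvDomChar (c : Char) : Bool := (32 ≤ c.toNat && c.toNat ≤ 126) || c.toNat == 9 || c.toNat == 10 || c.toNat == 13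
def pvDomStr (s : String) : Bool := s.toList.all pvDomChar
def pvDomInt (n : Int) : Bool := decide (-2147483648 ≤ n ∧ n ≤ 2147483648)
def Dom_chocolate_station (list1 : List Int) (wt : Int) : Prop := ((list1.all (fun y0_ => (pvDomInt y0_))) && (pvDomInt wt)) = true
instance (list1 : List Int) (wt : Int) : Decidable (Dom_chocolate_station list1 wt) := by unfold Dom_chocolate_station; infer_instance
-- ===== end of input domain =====

-- B removes A's running accumulator (it telescopes), taking a single max over adjacent pairs; simpler. Both mutate list1 in place identically (insert(0,0)); equivalence proved for the return value.


-- ===== PORT A =====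
def chocolate_station (list1 : List Int) (wt : Int) : Int :=
  let l := 0 :: list1                      -- list1.insert(0,0)
  let s := (PySem.List.pyRange 0 ((l.length : Int) - 1) 1).foldl
    (fun (s : Int × Int) i =>
      let dif := s.1 + PySem.List.pyGetD l i 0 - PySem.List.pyGetD l (i + 1) 0
      (dif, max s.2 (dif - PySem.List.pyGetD l i 0 - PySem.List.pyGetD l (i + 1) 0)))
    (0, -99999);                           -- (dif, maxTillNowDiff); indices are always in range
  -1 * s.2 * wt

-- ===== PORT B =====
def chocolate_station_alt (list1 : List Int) (wt : Int) : Int :=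
  let l := 0 :: list1                      -- list1.insert(0,0)
  let m := ((l.zip l.tail).map (fun p => -p.1 - 2 * p.2)).foldl max (-99999);
  -m * wt

-- ===== PRECONDITION & SPEC =====
def Spec_chocolate_station (list1 : List Int) (wt : Int) (out : Int) : Prop := out = chocolate_station_alt list1 wt
instance (list1 : List Int) (wt : Int) (out : Int) : Decidable (Spec_chocolate_station list1 wt out) := by unfold Spec_chocolate_station; infer_instance

-- ===== CLAIM (what is proved, stated in full; the proofs are below) =====
def Claim_equal_chocolate_station : Prop := ∀ (list1 : List Int) (wt : Int), Dom_chocolate_station list1 wt → Spec_chocolate_station list1 wt (chocolate_station list1 wt)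

-- ===== LEMMAS AND PROOFS =====

-- A's loop body as a function of the adjacent pair (l[i], l[i+1])
def pvStep (s : Int × Int) (p : Int × Int) : Int × Int :=
  let dif := s.1 + p.1 - p.2
  (dif, max s.2 (dif - p.1 - p.2))

-- the indexed pyRange fold of A equals the fold of pvStep over adjacent pairs
lemma pvFold_index_eq_zip (l : List Int) (init : Int × Int) :
    (PySem.List.pyRange 0 ((l.length : Int) - 1) 1).foldl
      (fun (s : Int × Int) i =>
        let dif := s.1 + PySem.List.pyGetD l i 0 - PySem.List.pyGetD l (i + 1) 0
        (dif, max s.2 (dif - PySem.List.pyGetD l i 0 - PySem.List.pyGetD l (i + 1) 0)))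
      init
    = (l.zip l.tail).foldl pvStep init := by
  have hlen : ((l.zip l.tail).length : Int) = (l.length : Int) - 1 ∨ l = [] := by
    cases l with
    | nil => right; rfl
    | cons x xs => left; simp [List.length_zip]
  rcases hlen with hlen | rfl
  · rw [← hlen]
    have hcongr :
        (PySem.List.pyRange 0 (((l.zip l.tail).length : Int)) 1).foldl
          (fun (s : Int × Int) i =>
            let dif := s.1 + PySem.List.pyGetD l i 0 - PySem.List.pyGetD l (i + 1) 0
            (dif, max s.2 (dif - PySem.List.pyGetD l i 0 - PySem.List.pyGetD l (i + 1) 0)))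
          init
        = (PySem.List.pyRange 0 (((l.zip l.tail).length : Int)) 1).foldl
          (fun (s : Int × Int) i => pvStep s (PySem.List.pyGetD (l.zip l.tail) i (0, 0)))
          init := by
      apply PySem.List.foldl_congr_mem
      intro acc i hi
      rw [PySem.List.mem_pyRange_one] at hi
      obtain ⟨h0, h1⟩ := hi
      have hiz : i < ((l.zip l.tail).length : Int) := h1
      have hil : i < (l.length : Int) := by omega
      have hil1 : i + 1 < (l.length : Int) := by
        have : ((l.zip l.tail).length : Int) ≤ (l.length : Int) - 1 := by
          simp [List.length_zip]; omega
        omega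
      rw [PySem.List.pyGetD_eq_getElem (l.zip l.tail) (0,0) h0 hiz,
          PySem.List.pyGetD_eq_getElem l 0 h0 hil,
          PySem.List.pyGetD_eq_getElem l 0 (by omega) hil1]
      have ht : (i + 1).toNat = i.toNat + 1 := by omega
      simp [pvStep, List.getElem_zip, List.getElem_tail, ht]
    rw [hcongr, PySem.List.foldl_pyRange_zero_pyGetD']
  · simp [PySem.List.pyRange]

-- the telescoping invariant: starting with dif = -x, the max component of the pair fold
-- is the fold of max over the per-pair values -a - 2*b
lemma pvTele : ∀ (rest : List Int) (x m : Int),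
    (((x :: rest).zip rest).foldl pvStep (-x, m)).2
    = (((x :: rest).zip rest).map (fun p => -p.1 - 2 * p.2)).foldl max m := by
  intro rest
  induction rest with
  | nil => intro x m; simp
  | cons y t ih =>
    intro x m
    have hstep : pvStep (-x, m) (x, y) = (-y, max m (-x - 2 * y)) := by
      simp only [pvStep, Prod.mk.injEq]
      refine ⟨by ring, ?_⟩
      congr 1; ring
    simp only [List.zip_cons_cons, List.foldl_cons, List.map_cons, hstep]
    exact ih y (max m (-x - 2 * y))

-- ===== VERDICT (by name: the statement is the Claim_ definition above) =====
theorem chocolate_station_spec : Claim_equal_chocolate_station := by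
  intro list1 wt _
  have h := pvTele list1 0 (-99999)
  simp only [neg_zero] at h
  simp only [Spec_chocolate_station, chocolate_station, chocolate_station_alt,
    pvFold_index_eq_zip, List.tail_cons, h]
  ring
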